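-- pv_equiv track=rewrite | github.com/Harris-X/safelora | scripts/train_samsum_lora.py | build_source_target
-- ===== SOURCE A (Python) =====
-- from typing import Dict, List
--
-- PROMPT_DICT = {
--     "prompt_input": (
--         "Below is an instruction that describes a task, paired with an input that provides further context. "
--         "Write a response that appropriately completes the request.\n\n"
--         "### Instruction:\n{instruction}\n\n### Input:\n{input}\n\n### Response:\n"
--     ),
--     "prompt_no_input": (
--         "Below is an instruction that describes a task. "
--         "Write a response that appropriately completes the request.\n\n"
--         "### Instruction:\n{instruction}\n\n### Response:\n"
--     ),
-- }
--
-- def build_source_target(messages: List[Dict[str, str]]) -> (str, str):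
--     user_text = ""
--     assistant_text = ""
--     for item in messages:
--         role = item.get("role", "")
--         content = item.get("content", "")
--         if role == "user":
--             user_text = content
--         elif role == "assistant":
--             assistant_text = content
--
--     instruction = "Summarize the following dialogue."
--     data_item = {"instruction": instruction, "input": user_text}
--
--     source = (
--         PROMPT_DICT["prompt_input"].format_map(data_item)
--         if data_item.get("input", "") != ""
--         else PROMPT_DICT["prompt_no_input"].format_map(data_item)
--     )
--     target = assistant_text
--     return source, target
-- ===== SOURCE B (Python) =====
-- from typing import Dict, List
--
-- PROMPT_DICT = {
--     "prompt_input": (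
--         "Below is an instruction that describes a task, paired with an input that provides further context. "
--         "Write a response that appropriately completes the request.\n\n"
--         "### Instruction:\n{instruction}\n\n### Input:\n{input}\n\n### Response:\n"
--     ),
--     "prompt_no_input": (
--         "Below is an instruction that describes a task. "
--         "Write a response that appropriately completes the request.\n\n"
--         "### Instruction:\n{instruction}\n\n### Response:\n"
--     ),
-- }
--
-- def build_source_target(messages: List[Dict[str, str]]) -> (str, str):
--     user_text = next((m.get("content", "") for m in reversed(messages)
--                       if m.get("role", "") == "user"), "")
--     assistant_text = next((m.get("content", "") for m in reversed(messages)
--                            if m.get("role", "") == "assistant"), "")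
--     instruction = "Summarize the following dialogue."
--     source = (
--         PROMPT_DICT["prompt_input"].format_map({"instruction": instruction, "input": user_text})
--         if user_text != ""
--         else PROMPT_DICT["prompt_no_input"].format_map({"instruction": instruction})
--     )
--     return source, assistant_text
-- ===== Notes on version B (the rewrite author's own statement) =====
-- stated objective: idiomatic
-- what changed: Replaced the single forward scan that keeps overwriting user_text/assistant_text with two short-circuiting reverse lookups (next over reversed(messages)) for the last 'user' and last 'assistant' message.
import Mathlib
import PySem

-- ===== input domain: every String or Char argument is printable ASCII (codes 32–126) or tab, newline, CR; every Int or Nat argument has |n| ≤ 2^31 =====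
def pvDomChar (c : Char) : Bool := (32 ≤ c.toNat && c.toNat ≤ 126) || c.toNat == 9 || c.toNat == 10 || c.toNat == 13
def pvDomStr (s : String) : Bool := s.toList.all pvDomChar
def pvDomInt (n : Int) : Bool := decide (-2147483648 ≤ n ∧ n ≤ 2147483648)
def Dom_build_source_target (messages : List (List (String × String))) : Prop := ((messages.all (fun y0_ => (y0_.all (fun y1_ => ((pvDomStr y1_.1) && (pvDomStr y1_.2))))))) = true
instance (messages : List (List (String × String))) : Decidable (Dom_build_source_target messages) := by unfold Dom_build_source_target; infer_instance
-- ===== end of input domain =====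

-- B replaces A's forward overwrite scan with two short-circuiting reverse lookups (idiomatic; same O(n) cost).

-- ===== PORT A =====
-- shared module constant: PROMPT_DICT templates, format_map with the constant instruction
def pvPromptInput (instruction input : String) : String :=
  "Below is an instruction that describes a task, paired with an input that provides further context. Write a response that appropriately completes the request.\n\n### Instruction:\n" ++ instruction ++ "\n\n### Input:\n" ++ input ++ "\n\n### Response:\n"

def pvPromptNoInput (instruction : String) : String :=
  "Below is an instruction that describes a task. Write a response that appropriately completes the request.\n\n### Instruction:\n" ++ instruction ++ "\n\n### Response:\n"

-- item.get(k, "") : first-match association-list lookup with default ""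
def pvGet (m : List (String × String)) (k : String) : String :=
  ((m.find? (fun p => p.1 == k)).map Prod.snd).getD ""

-- the loop body of A's for-loop
def pvStep (s : String × String) (item : List (String × String)) : String × String :=
  let role := pvGet item "role"
  let content := pvGet item "content"
  if role == "user" then (content, s.2)
  else if role == "assistant" then (s.1, content)
  else s

def build_source_target (messages : List (List (String × String))) : String × String :=
  let st := messages.foldl pvStep ("", "")
  let user_text := st.1
  let assistant_text := st.2
  let instruction := "Summarize the following dialogue."
  let source := if user_text != "" then pvPromptInput instruction user_text
                else pvPromptNoInput instruction
  (source, assistant_text)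

-- ===== PORT B =====
-- next((m.get("content","") for m in reversed(messages) if m.get("role","") == r), "")
def pvLastByRole (messages : List (List (String × String))) (r : String) : String :=
  ((messages.reverse.find? (fun m => pvGet m "role" == r)).map (fun m => pvGet m "content")).getD ""

def build_source_target_alt (messages : List (List (String × String))) : String × String :=
  let user_text := pvLastByRole messages "user"
  let assistant_text := pvLastByRole messages "assistant"
  let instruction := "Summarize the following dialogue."
  let source := if user_text != "" then pvPromptInput instruction user_text
                else pvPromptNoInput instruction
  (source, assistant_text)

-- ===== PRECONDITION & SPEC =====
def Spec_build_source_target (messages : List (List (String × String))) (out : String × String) : Prop := out = build_source_target_alt messages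
instance (messages : List (List (String × String))) (out : String × String) : Decidable (Spec_build_source_target messages out) := by unfold Spec_build_source_target; infer_instance

-- ===== CLAIM (what is proved, stated in full; the proofs are below) =====
def Claim_equal_build_source_target : Prop := ∀ (messages : List (List (String × String))), Dom_build_source_target messages → Spec_build_source_target messages (build_source_target messages)

-- ===== LEMMAS AND PROOFS =====

-- A's fold from an arbitrary start state computes, per component, the last matching
-- role's content (defaulting to the start state's component).
theorem foldl_step_eq_lastByRole (ms : List (List (String × String))) (u a : String) :
    ms.foldl pvStep (u, a) =
      (((ms.reverse.find? (fun m => pvGet m "role" == "user")).map (fun m => pvGet m "content")).getD u,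
       ((ms.reverse.find? (fun m => pvGet m "role" == "assistant")).map (fun m => pvGet m "content")).getD a) := by
  induction ms generalizing u a with
  | nil => simp
  | cons x xs ih =>
    simp only [List.foldl_cons, List.reverse_cons, List.find?_append, List.find?_singleton]
    rw [ih]
    rcases hu : xs.reverse.find? (fun m => pvGet m "role" == "user") with _ | mu <;>
      rcases ha : xs.reverse.find? (fun m => pvGet m "role" == "assistant") with _ | ma <;>
      simp only [pvStep, Option.none_or, Option.some_or] <;>
      split_ifs with h1 h2 <;> simp_all

theorem build_source_target_eq (messages : List (List (String × String))) :
    build_source_target messages = build_source_target_alt messages := by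
  simp only [build_source_target, build_source_target_alt, pvLastByRole,
    foldl_step_eq_lastByRole]

-- ===== VERDICT (by name: the statement is the Claim_ definition above) =====
theorem build_source_target_spec : Claim_equal_build_source_target := by
  intro messages _
  unfold Spec_build_source_target
  exact build_source_target_eq messages
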